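-- pv_equiv track=rewrite | github.com/jano31415/codejam | codeforces/global_16/proba.py | solve
-- ===== SOURCE A (Python) =====
-- def solve(s):
--     if "1" not in s:
--         return 1
--     if "0" not in s:
--         return 0
--     zeros = 0
--     cur_zero=False
--     for x in s:
--         if x == "0":
--             if not cur_zero:
--                 zeros += 1
--                 cur_zero = True
--         if x == "1":
--             cur_zero = False
--         if zeros == 2:
--             break
--     return min(zeros,2)
-- ===== SOURCE B (Python) =====
-- def solve(s):
--     if "1" not in s:
--         return 1
--     if "0" not in s:
--         return 0
--     blocks = sum(1 for p in s.split("1") if "0" in p)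
--     return min(blocks, 2)
-- ===== Notes on version B (the rewrite author's own statement) =====
-- stated objective: simpler
-- what changed: Replaces the stateful scan with a cur_zero flag and early break by splitting on '1' and counting the pieces that contain a '0' (each such piece is one maximal zero-block), capped at 2.
import Mathlib
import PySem

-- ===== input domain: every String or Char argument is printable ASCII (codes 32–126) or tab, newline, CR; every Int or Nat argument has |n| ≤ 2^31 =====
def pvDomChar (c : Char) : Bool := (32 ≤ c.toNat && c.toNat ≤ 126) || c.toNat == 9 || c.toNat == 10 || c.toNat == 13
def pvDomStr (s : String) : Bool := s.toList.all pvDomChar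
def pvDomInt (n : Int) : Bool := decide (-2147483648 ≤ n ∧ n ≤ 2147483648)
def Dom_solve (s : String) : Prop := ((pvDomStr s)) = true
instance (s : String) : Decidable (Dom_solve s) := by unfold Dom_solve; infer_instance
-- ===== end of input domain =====

-- B replaces A's stateful flag-scan with split-on-'1' and a count of pieces containing '0' (simpler decomposition, same cost).

-- ===== PORT A =====
-- the for-loop over s with state (zeros, cur_zero) and the 'zeros == 2: break'
def solveLoop : List Char → Int → Bool → Int
  | [], zeros, _ => min zeros 2
  | x :: rest, zeros, curZero =>
      let zeros' := if x = '0' then (if curZero then zeros else zeros + 1) else zeros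
      let cur' := if x = '0' then true else if x = '1' then false else curZero
      if zeros' = 2 then min zeros' 2 else solveLoop rest zeros' cur'

def solve (s : String) : Int :=
  if !(PySem.Str.isIn "1" s) then 1
  else if !(PySem.Str.isIn "0" s) then 0
  else solveLoop s.toList 0 false

-- ===== PORT B =====
def solve_alt (s : String) : Int :=
  if !(PySem.Str.isIn "1" s) then 1
  else if !(PySem.Str.isIn "0" s) then 0
  else
    let blocks := (PySem.Chars.splitOn s.toList "1".toList).countP
      (fun p => PySem.Chars.isIn "0".toList p)
    min (blocks : Int) 2

-- ===== PRECONDITION & SPEC =====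
def Spec_solve (s : String) (out : Int) : Prop := out = solve_alt s
instance (s : String) (out : Int) : Decidable (Spec_solve s out) := by unfold Spec_solve; infer_instance

-- ===== CLAIM (what is proved, stated in full; the proofs are below) =====
def Claim_equal_solve : Prop := ∀ (s : String), Dom_solve s → Spec_solve s (solve s)

-- ===== LEMMAS AND PROOFS =====

-- pure model of splitting on '1'
def consHead (pre : List Char) : List (List Char) → List (List Char)
  | [] => [pre]
  | p :: ps => (pre ++ p) :: ps

def pieces : List Char → List (List Char)
  | [] => [[]]
  | c :: rest => if c = '1' then [] :: pieces rest else consHead [c] (pieces rest)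

-- pure model of A's block counter
def nblocks : List Char → Bool → Nat
  | [], _ => 0
  | c :: rest, cur =>
      if c = '0' then (if cur then 0 else 1) + nblocks rest true
      else if c = '1' then nblocks rest false
      else nblocks rest cur

lemma pieces_cons_exists (cs : List Char) : ∃ p ps, pieces cs = p :: ps := by
  cases cs with
  | nil => exact ⟨[], [], rfl⟩
  | cons c rest =>
    simp only [pieces]
    by_cases h : c = '1'
    · simp [h]
    · simp only [h, if_false]
      obtain ⟨p, ps, hp⟩ := pieces_cons_exists rest
      rw [hp]; exact ⟨_, _, rfl⟩

lemma go_eq : ∀ (fuel : Nat) (l cur : List Char) (acc : List (List Char)),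
    l.length ≤ fuel →
    PySem.Chars.splitOn.go ['1'] fuel l cur acc = acc.reverse ++ consHead cur.reverse (pieces l)
  | 0, [], cur, acc, _ => by
      simp [PySem.Chars.splitOn.go, pieces, consHead]
  | 0, c :: rest, cur, acc, h => by simp at h
  | fuel + 1, [], cur, acc, _ => by
      simp [PySem.Chars.splitOn.go, pieces, consHead]
  | fuel + 1, c :: rest, cur, acc, h => by
      simp only [PySem.Chars.splitOn.go]
      by_cases hc : c = '1'
      · have hpref : List.isPrefixOf ['1'] (c :: rest) = true := by
          simp [List.isPrefixOf, hc]
        rw [hpref]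
        simp only [if_true]
        have hrec := go_eq fuel rest [] (cur.reverse :: acc) (by simp at h; omega)
        simp only [List.length_cons, List.length_nil, List.drop_succ_cons, List.drop_zero] at hrec ⊢
        rw [hrec]
        obtain ⟨p, ps, hp⟩ := pieces_cons_exists rest
        simp [pieces, hc, hp, consHead]
      · have hpref : List.isPrefixOf ['1'] (c :: rest) = false := by
          simp [List.isPrefixOf]; intro hh; exact absurd hh.symm hc
        rw [hpref]
        simp only [Bool.false_eq_true, if_false]
        have hrec := go_eq fuel rest (c :: cur) acc (by simp at h; omega)
        rw [hrec]
        obtain ⟨p, ps, hp⟩ := pieces_cons_exists rest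
        simp [pieces, hc, hp, consHead]

lemma splitOn_eq_pieces (l : List Char) : PySem.Chars.splitOn l ['1'] = pieces l := by
  unfold PySem.Chars.splitOn
  rw [go_eq (l.length + 1) l [] [] (by omega)]
  obtain ⟨p, ps, hp⟩ := pieces_cons_exists l
  simp [hp, consHead]

-- A's counter equals the number of pieces containing '0'
lemma nblocks_spec : ∀ cs : List Char,
    nblocks cs false = (pieces cs).countP (fun p => decide ('0' ∈ p)) ∧
    nblocks cs true + (if '0' ∈ (pieces cs).headI then 1 else 0)
      = (pieces cs).countP (fun p => decide ('0' ∈ p))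
  | [] => by simp [nblocks, pieces]
  | c :: rest => by
      obtain ⟨p, ps, hp⟩ := pieces_cons_exists rest
      obtain ⟨ih1, ih2⟩ := nblocks_spec rest
      rw [hp] at ih1 ih2
      by_cases hc0 : c = '0'
      · have hc1 : c ≠ '1' := by simp [hc0]
        simp only [pieces, nblocks, hc0, if_true, hp, consHead]
        simp only [List.headI, List.countP_cons] at *
        by_cases hp0 : '0' ∈ p <;> simp_all <;> omega
      · by_cases hc1 : c = '1'
        · simp only [pieces, nblocks, hc1, if_true, hp]
          simp only [List.headI, List.countP_cons] at *
          by_cases hp0 : '0' ∈ p <;> simp_all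
        · simp only [pieces, nblocks, hc0, hc1, if_false, hp, consHead]
          simp only [List.headI, List.countP_cons] at *
          have hmem : ('0' ∈ c :: p) = ('0' ∈ p) := by
            simp [List.mem_cons, Ne.symm hc0]
          by_cases hp0 : '0' ∈ p <;> simp_all

-- the loop of A computes min (z + nblocks) 2
lemma solveLoop_eq : ∀ (cs : List Char) (z : Nat) (cur : Bool),
    solveLoop cs (z : Int) cur = min ((z + nblocks cs cur : Nat) : Int) 2
  | [], z, cur => by simp [solveLoop, nblocks]
  | c :: rest, z, cur => by
      have hnn : ∀ (m : Nat) (b : Bool), solveLoop rest ((m : Nat) : Int) b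
          = min ((m + nblocks rest b : Nat) : Int) 2 := fun m b => solveLoop_eq rest m b
      simp only [solveLoop, nblocks]
      by_cases hc0 : c = '0'
      · subst hc0
        cases cur with
        | false =>
          simp only [reduceIte, Bool.false_eq_true]
          by_cases h2 : z = 1
          · subst h2; rw [if_pos (by norm_num)]; push_cast; omega
          · rw [if_neg (by omega : ¬((z : Int) + 1 = 2))]
            rw [show (z : Int) + 1 = ((z + 1 : Nat) : Int) by push_cast; ring, hnn (z + 1) true]
            push_cast; omega
        | true =>
          simp only [reduceIte]
          by_cases h2 : z = 2
          · subst h2; rw [if_pos (by norm_num)]; push_cast; omega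
          · rw [if_neg (by omega : ¬((z : Int) = 2))]
            rw [hnn z true]; push_cast; omega
      · by_cases hc1 : c = '1'
        · subst hc1
          simp only [if_neg (show ¬(('1' : Char) = '0') by decide), if_true]
          by_cases h2 : z = 2
          · subst h2; rw [if_pos (by norm_num)]; push_cast; omega
          · rw [if_neg (by omega : ¬((z : Int) = 2))]
            rw [hnn z false]
        · simp only [if_neg hc0, if_neg hc1]
          by_cases h2 : z = 2
          · subst h2; rw [if_pos (by norm_num)]; push_cast; omega
          · rw [if_neg (by omega : ¬((z : Int) = 2))]
            rw [hnn z cur]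

lemma countP_isIn_eq (l : List (List Char)) :
    l.countP (fun p => PySem.Chars.isIn "0".toList p)
      = l.countP (fun p => decide ('0' ∈ p)) := by
  apply List.countP_congr
  intro p _
  have h : PySem.Chars.isIn ['0'] p = true ↔ ('0' ∈ p) := by
    rw [PySem.Chars.isIn_iff_infix, List.singleton_infix_iff]
  simp only [show ("0".toList : List Char) = ['0'] from rfl]
  by_cases hm : '0' ∈ p
  · simp [h.mpr hm, hm]
  · simp only [hm, decide_false]
    by_cases hi : PySem.Chars.isIn ['0'] p = true
    · exact absurd (h.mp hi) hm
    · simp [Bool.not_eq_true] at hi; simp [hi]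

-- ===== VERDICT (by name: the statement is the Claim_ definition above) =====
theorem solve_spec : Claim_equal_solve := by
  intro s _
  unfold Spec_solve solve solve_alt
  have hmain : solveLoop s.toList 0 false
      = min ((((PySem.Chars.splitOn s.toList "1".toList).countP
          (fun p => PySem.Chars.isIn "0".toList p)) : Nat) : Int) 2 := by
    have h := solveLoop_eq s.toList 0 false
    rw [show ((0 : Nat) : Int) = (0 : Int) by simp] at h
    rw [h, countP_isIn_eq]
    rw [show ("1".toList : List Char) = ['1'] from rfl, splitOn_eq_pieces]
    rw [← (nblocks_spec s.toList).1]
    simp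
  rw [hmain]
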